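-- pv_equiv track=rewrite | github.com/MassyuRed/mashos-api | ai/services/ai_inference/analysis_report_validity_gate.py | infer_self_structure_material_fields_from_items
-- ===== SOURCE A (Python) =====
-- from typing import Any, Dict, Iterable, Mapping, Optional, Sequence
--
-- _SELF_STRUCTURE_MATERIAL_FIELDS = {
--     "target_hint",
--     "target",
--     "role_hint",
--     "role",
--     "thinking",
--     "thinking_signals",
--     "action",
--     "action_signals",
--     "text_secondary",
--     "memo_action",
--     "question_text",
--     "text_primary",
-- }
--
-- def infer_self_structure_material_fields_from_items(items: Optional[Sequence[Any]]) -> list[str]: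
--     fields: set[str] = set()
--     for item in items or []:
--         raw: Mapping[str, Any]
--         if isinstance(item, Mapping):
--             raw = item
--             keys = raw.keys()
--         else:
--             keys = (
--                 "target_hint",
--                 "role_hint",
--                 "text_primary",
--                 "text_secondary",
--                 "action_signals",
--                 "emotion_signals",
--                 "question_text",
--             )
--             raw = {key: getattr(item, key, None) for key in keys}
--         for key, value in raw.items():
--             if key in _SELF_STRUCTURE_MATERIAL_FIELDS and value not in (None, "", [], {}):
--                 fields.add(str(key))
--     return sorted(fields)
-- ===== SOURCE B (Python) =====
-- _SORTED_MATERIAL_FIELDS = (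
--     "action", "action_signals", "memo_action", "question_text",
--     "role", "role_hint", "target", "target_hint",
--     "text_primary", "text_secondary", "thinking", "thinking_signals",
-- )
--
--
-- def _field_is_present(field, seq):
--     for item in seq:
--         if item.get(field) not in (None, "", [], {}):
--             return True
--     return False
--
--
-- def infer_self_structure_material_fields_from_items(items):
--     seq = items or []
--     result = []
--     for field in _SORTED_MATERIAL_FIELDS:
--         if _field_is_present(field, seq):
--             result.append(field)
--     return result
-- ===== Notes on version B (the rewrite author's own statement) =====
-- stated objective: alternative
-- what changed: Field-major traversal: instead of scanning every key of every item into a set and sorting it, B walks the fixed pre-sorted 12-field tuple and keeps a field iff a helper scan over the items (with early return) finds it present with a non-empty value, so no set and no sort are needed.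
import Mathlib
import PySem

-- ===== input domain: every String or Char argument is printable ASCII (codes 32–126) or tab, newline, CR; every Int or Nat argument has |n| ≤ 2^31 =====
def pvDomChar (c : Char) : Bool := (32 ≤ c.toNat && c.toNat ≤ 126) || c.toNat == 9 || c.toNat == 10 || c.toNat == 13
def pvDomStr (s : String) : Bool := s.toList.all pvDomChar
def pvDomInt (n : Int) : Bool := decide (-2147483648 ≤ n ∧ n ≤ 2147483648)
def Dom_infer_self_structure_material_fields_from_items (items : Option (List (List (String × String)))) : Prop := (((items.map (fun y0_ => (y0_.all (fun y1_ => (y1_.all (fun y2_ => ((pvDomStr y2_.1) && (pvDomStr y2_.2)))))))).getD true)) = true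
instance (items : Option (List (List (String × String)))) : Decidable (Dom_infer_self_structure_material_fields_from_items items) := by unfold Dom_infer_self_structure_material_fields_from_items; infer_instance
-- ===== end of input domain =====

-- B replaces A's key-major scan (collect every present material key of every item into a set, then sort)
-- by a field-major scan: walk the fixed pre-sorted 12-field list and keep a field iff a helper scan over
-- the items (early return) finds it with a non-empty value — alternative decomposition, no set and no sort.
-- (For this input type every item is a Mapping, so A's non-Mapping branch is unreachable and not ported.)

-- ===== PORT A =====
-- the module constant _SELF_STRUCTURE_MATERIAL_FIELDS (a set used only for membership)
def pvMaterialFields : List String :=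
  ["target_hint", "target", "role_hint", "role", "thinking", "thinking_signals",
   "action", "action_signals", "text_secondary", "memo_action", "question_text", "text_primary"]

def infer_self_structure_material_fields_from_items (items : Option (List (List (String × String)))) : List String :=
  -- fields = set(); for item in items or []: for key, value in item.items(): if key in FIELDS and value not in (None,"",[],{}): fields.add(str(key))
  let fields : PySem.Set String :=
    (items.getD []).foldl
      (fun fields item =>
        (PySem.Dict.ofList item).items.foldl
          (fun fields kv =>
            if pvMaterialFields.contains kv.1 && kv.2 != "" then PySem.Set.add fields kv.1 else fields)
          fields)
      PySem.Set.empty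
  PySem.List.sorted fields (fun x => x) false

-- ===== PORT B =====
-- _SORTED_MATERIAL_FIELDS (the same 12 fields, pre-sorted)
def pvSortedMaterialFields : List String :=
  ["action", "action_signals", "memo_action", "question_text",
   "role", "role_hint", "target", "target_hint",
   "text_primary", "text_secondary", "thinking", "thinking_signals"]

-- _field_is_present(field, seq): scan the items, early return on the first that presents the field non-empty
def pvFieldIsPresent (field : String) : List (List (String × String)) → Bool
  | [] => false
  | item :: rest =>
    if (PySem.Dict.ofList item).getD field "" != "" then true
    else pvFieldIsPresent field rest

-- the outer for-loop of B: walk the candidate fields, append the present ones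
def pvCollectFields (seq : List (List (String × String))) : List String → List String
  | [] => []
  | f :: rest =>
    if pvFieldIsPresent f seq then f :: pvCollectFields seq rest
    else pvCollectFields seq rest

def infer_self_structure_material_fields_from_items_alt (items : Option (List (List (String × String)))) : List String :=
  pvCollectFields (items.getD []) pvSortedMaterialFields

-- ===== PRECONDITION & SPEC =====
def Spec_infer_self_structure_material_fields_from_items (items : Option (List (List (String × String)))) (out : List String) : Prop := out = infer_self_structure_material_fields_from_items_alt items
instance (items : Option (List (List (String × String)))) (out : List String) : Decidable (Spec_infer_self_structure_material_fields_from_items items out) := by unfold Spec_infer_self_structure_material_fields_from_items; infer_instance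

-- ===== CLAIM (what is proved, stated in full; the proofs are below) =====
def Claim_equal_infer_self_structure_material_fields_from_items : Prop := ∀ (items : Option (List (List (String × String)))), Dom_infer_self_structure_material_fields_from_items items → Spec_infer_self_structure_material_fields_from_items items (infer_self_structure_material_fields_from_items items)

-- ===== LEMMAS AND PROOFS =====

-- membership in the inner fold (over one dict's items)
theorem pv_mem_inner_fold (l : List (String × String)) (s : PySem.Set String) (x : String) :
    x ∈ l.foldl (fun s kv => if pvMaterialFields.contains kv.1 && kv.2 != "" then PySem.Set.add s kv.1 else s) s ↔
      x ∈ s ∨ ∃ kv ∈ l, (pvMaterialFields.contains kv.1 && kv.2 != "") = true ∧ kv.1 = x := by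
  induction l generalizing s with
  | nil => simp
  | cons kv t ih =>
    rw [List.foldl_cons]
    by_cases h : (pvMaterialFields.contains kv.1 && kv.2 != "") = true
    · rw [if_pos h, ih, PySem.Set.mem_add]
      constructor
      · rintro ((hs | rfl) | ⟨p, hp, hc, rfl⟩)
        · exact Or.inl hs
        · exact Or.inr ⟨kv, List.mem_cons_self .., h, rfl⟩
        · exact Or.inr ⟨p, List.mem_cons_of_mem _ hp, hc, rfl⟩
      · rintro (hs | ⟨p, hp, hc, rfl⟩)
        · exact Or.inl (Or.inl hs)
        · rcases List.mem_cons.mp hp with rfl | hp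
          · exact Or.inl (Or.inr rfl)
          · exact Or.inr ⟨p, hp, hc, rfl⟩
    · rw [if_neg h, ih]
      constructor
      · rintro (hs | ⟨p, hp, hc, rfl⟩)
        · exact Or.inl hs
        · exact Or.inr ⟨p, List.mem_cons_of_mem _ hp, hc, rfl⟩
      · rintro (hs | ⟨p, hp, hc, rfl⟩)
        · exact Or.inl hs
        · rcases List.mem_cons.mp hp with rfl | hp
          · exact absurd hc h
          · exact Or.inr ⟨p, hp, hc, rfl⟩

-- the inner fold preserves Nodup
theorem pv_nodup_inner_fold (l : List (String × String)) (s : PySem.Set String) (hs : s.Nodup) :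
    (l.foldl (fun s kv => if pvMaterialFields.contains kv.1 && kv.2 != "" then PySem.Set.add s kv.1 else s) s).Nodup := by
  induction l generalizing s with
  | nil => exact hs
  | cons kv t ih =>
    rw [List.foldl_cons]
    split
    · exact ih _ (PySem.Set.nodup_add _ _ hs)
    · exact ih _ hs

-- membership in the outer fold
theorem pv_mem_outer_fold (L : List (List (String × String))) (s : PySem.Set String) (x : String) :
    x ∈ L.foldl (fun s item => (PySem.Dict.ofList item).items.foldl
        (fun s kv => if pvMaterialFields.contains kv.1 && kv.2 != "" then PySem.Set.add s kv.1 else s) s) s ↔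
      x ∈ s ∨ ∃ item ∈ L, ∃ kv ∈ (PySem.Dict.ofList item).items,
        (pvMaterialFields.contains kv.1 && kv.2 != "") = true ∧ kv.1 = x := by
  induction L generalizing s with
  | nil => simp
  | cons item t ih =>
    rw [List.foldl_cons, ih, pv_mem_inner_fold]
    constructor
    · rintro ((hs | ⟨kv, hkv, hc, rfl⟩) | ⟨it, hit, kv, hkv, hc, rfl⟩)
      · exact Or.inl hs
      · exact Or.inr ⟨item, List.mem_cons_self .., kv, hkv, hc, rfl⟩
      · exact Or.inr ⟨it, List.mem_cons_of_mem _ hit, kv, hkv, hc, rfl⟩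
    · rintro (hs | ⟨it, hit, kv, hkv, hc, rfl⟩)
      · exact Or.inl (Or.inl hs)
      · rcases List.mem_cons.mp hit with rfl | hit
        · exact Or.inl (Or.inr ⟨kv, hkv, hc, rfl⟩)
        · exact Or.inr ⟨it, hit, kv, hkv, hc, rfl⟩

-- the outer fold preserves Nodup
theorem pv_nodup_outer_fold (L : List (List (String × String))) (s : PySem.Set String) (hs : s.Nodup) :
    (L.foldl (fun s item => (PySem.Dict.ofList item).items.foldl
        (fun s kv => if pvMaterialFields.contains kv.1 && kv.2 != "" then PySem.Set.add s kv.1 else s) s) s).Nodup := by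
  induction L generalizing s with
  | nil => exact hs
  | cons item t ih => exact ih _ (pv_nodup_inner_fold _ _ hs)

-- B's helper as an existential
theorem pv_fieldIsPresent_iff (f : String) (L : List (List (String × String))) :
    pvFieldIsPresent f L = true ↔ ∃ item ∈ L, ((PySem.Dict.ofList item).getD f "" != "") = true := by
  induction L with
  | nil => simp [pvFieldIsPresent]
  | cons item t ih =>
    rw [pvFieldIsPresent]
    split
    · simp_all
    · simp_all [ih]

-- B's outer loop is a filter over the field list
theorem pv_collect_eq_filter (L : List (List (String × String))) (fs : List String) :
    pvCollectFields L fs = fs.filter (fun f => pvFieldIsPresent f L) := by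
  induction fs with
  | nil => rfl
  | cons f rest ih =>
    rw [pvCollectFields, List.filter_cons]
    split <;> simp_all

-- A-side membership condition ↔ B's presence predicate, via get? on a nodup-key dict
theorem pv_cond_iff_present (L : List (List (String × String))) (x : String) :
    (∃ item ∈ L, ∃ kv ∈ (PySem.Dict.ofList item).items,
        (pvMaterialFields.contains kv.1 && kv.2 != "") = true ∧ kv.1 = x) ↔
      x ∈ pvMaterialFields ∧ pvFieldIsPresent x L = true := by
  rw [pv_fieldIsPresent_iff]
  constructor
  · rintro ⟨item, hit, ⟨k, v⟩, hkv, hc, rfl⟩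
    simp only [Bool.and_eq_true, List.contains_iff_mem] at hc
    refine ⟨hc.1, item, hit, ?_⟩
    rw [PySem.Dict.getD_of_mem_items _ hkv (PySem.Dict.nodup_keys_ofList item)]
    exact hc.2
  · rintro ⟨hmem, item, hit, hv⟩
    cases hg : (PySem.Dict.ofList item).get? x with
    | none =>
      rw [PySem.Dict.getD_eq_get?_getD, hg] at hv
      exact absurd hv (by simp)
    | some v =>
      rw [PySem.Dict.getD_eq_get?_getD, hg] at hv
      simp only [Option.getD_some] at hv
      exact ⟨item, hit, (x, v), PySem.Dict.mem_items_of_get?_eq_some _ hg,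
        by simp [hmem, hv], rfl⟩

-- the two literal field lists are permutations of each other
theorem pv_fields_perm : pvSortedMaterialFields.Perm pvMaterialFields := by decide

-- the sorted field list is strictly increasing
theorem pv_fields_sorted : pvSortedMaterialFields.Pairwise (· < ·) := by
  have h : pvSortedMaterialFields.Pairwise (fun a b => a.toList < b.toList) := by decide
  exact h.imp (fun {a b} hab => String.lt_iff_toList_lt.mpr hab)

-- ===== VERDICT (by name: the statement is the Claim_ definition above) =====
theorem infer_self_structure_material_fields_from_items_spec : Claim_equal_infer_self_structure_material_fields_from_items := by
  unfold Claim_equal_infer_self_structure_material_fields_from_items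
  intro items _
  unfold Spec_infer_self_structure_material_fields_from_items
  unfold infer_self_structure_material_fields_from_items infer_self_structure_material_fields_from_items_alt
  set L := items.getD [] with hL
  rw [pv_collect_eq_filter]
  apply PySem.List.sorted_eq_of_perm_of_pairwise_lt
  · rw [List.perm_ext_iff_of_nodup (List.Nodup.filter _ (pv_fields_perm.nodup_iff.mpr (by decide)))
      (pv_nodup_outer_fold L PySem.Set.empty List.nodup_nil)]
    intro x
    rw [List.mem_filter, pv_mem_outer_fold]
    simp only [PySem.Set.empty, List.not_mem_nil, false_or]
    rw [pv_cond_iff_present]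
    constructor
    · rintro ⟨hmem, hp⟩
      exact ⟨pv_fields_perm.mem_iff.mp hmem, hp⟩
    · rintro ⟨hmem, hp⟩
      exact ⟨pv_fields_perm.mem_iff.mpr hmem, hp⟩
  · exact List.Pairwise.filter _ pv_fields_sorted
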